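-- pv_equiv track=rewrite | github.com/estroop3-gif/second-watch-network | backend/app/core/policies.py | should_auto_hold_content
-- ===== SOURCE A (Python) =====
-- class ContentModerationThresholds:
--     """Thresholds for automatic content actions."""
--
--     # Number of serious flags before auto-hold
--     SERIOUS_FLAGS_FOR_AUTO_HOLD = 3
--
--     # Number of any flags before review priority bump
--     FLAGS_FOR_PRIORITY_BUMP = 5
--
--     # Time window for flag counting (hours)
--     FLAG_COUNTING_WINDOW_HOURS = 24
--
--     # Severity weights for flag scoring
--     FLAG_SEVERITY_WEIGHTS = {
--         "low": 1,
--         "medium": 2,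
--         "high": 5,
--         "critical": 10,
--     }
--
--     # Weighted flag score for auto-hold
--     WEIGHTED_SCORE_FOR_AUTO_HOLD = 15
--
-- def calculate_flag_weight_score(flags: list) -> int:
--     """Calculate weighted score from a list of flags."""
--     score = 0
--     for flag in flags:
--         severity = flag.get("severity", "medium")
--         score += ContentModerationThresholds.FLAG_SEVERITY_WEIGHTS.get(severity, 2)
--     return score
--
-- def should_auto_hold_content(flags: list) -> bool:
--     """Determine if content should be auto-held based on flags."""
--     # Count serious flags
--     serious_count = sum(
--         1 for f in flags
--         if f.get("severity") in ("high", "critical")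
--     )
--
--     if serious_count >= ContentModerationThresholds.SERIOUS_FLAGS_FOR_AUTO_HOLD:
--         return True
--
--     # Check weighted score
--     if calculate_flag_weight_score(flags) >= ContentModerationThresholds.WEIGHTED_SCORE_FOR_AUTO_HOLD:
--         return True
--
--     return False
-- ===== SOURCE B (Python) =====
-- class ContentModerationThresholds:
--     SERIOUS_FLAGS_FOR_AUTO_HOLD = 3
--     FLAGS_FOR_PRIORITY_BUMP = 5
--     FLAG_COUNTING_WINDOW_HOURS = 24
--     FLAG_SEVERITY_WEIGHTS = {"low": 1, "medium": 2, "high": 5, "critical": 10}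
--     WEIGHTED_SCORE_FOR_AUTO_HOLD = 15
--
--
-- def should_auto_hold_content(flags: list) -> bool:
--     # One pass builds a frequency table keyed by the raw severity value
--     # (None when the key is missing); both tests are read off the table.
--     table = {}
--     for f in flags:
--         sev = f.get("severity")
--         table[sev] = table.get(sev, 0) + 1
--     serious = table.get("high", 0) + table.get("critical", 0)
--     weights = ContentModerationThresholds.FLAG_SEVERITY_WEIGHTS
--     score = sum(n * (2 if sev is None else weights.get(sev, 2))
--                 for sev, n in table.items())
--     return (serious >= ContentModerationThresholds.SERIOUS_FLAGS_FOR_AUTO_HOLD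
--             or score >= ContentModerationThresholds.WEIGHTED_SCORE_FOR_AUTO_HOLD)
-- ===== Notes on version B (the rewrite author's own statement) =====
-- stated objective: alternative
-- what changed: B makes one pass building a frequency table keyed by each flag's raw severity (None when absent), then reads the serious count off the 'high'/'critical' entries and computes the weighted score by walking the small table as count*weight, instead of A's two separate scans of the flag list.
import Mathlib
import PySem

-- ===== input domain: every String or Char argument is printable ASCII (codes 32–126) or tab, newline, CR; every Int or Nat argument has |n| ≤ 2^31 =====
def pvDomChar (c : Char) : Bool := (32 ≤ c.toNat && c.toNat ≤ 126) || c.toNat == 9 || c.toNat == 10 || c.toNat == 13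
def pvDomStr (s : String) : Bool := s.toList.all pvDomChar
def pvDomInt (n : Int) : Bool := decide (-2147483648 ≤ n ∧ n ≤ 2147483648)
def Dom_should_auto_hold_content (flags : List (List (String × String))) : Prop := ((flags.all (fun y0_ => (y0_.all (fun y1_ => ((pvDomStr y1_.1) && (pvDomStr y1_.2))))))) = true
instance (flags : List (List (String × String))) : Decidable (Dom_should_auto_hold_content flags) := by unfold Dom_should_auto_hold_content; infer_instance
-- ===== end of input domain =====

-- ===== PORT A =====
-- B replaces A's two list scans with one frequency-table pass plus a walk over the small table (alternative decomposition, same cost).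

-- FLAG_SEVERITY_WEIGHTS
def pvWeights : PySem.Dict String Int :=
  PySem.Dict.ofList [("low", 1), ("medium", 2), ("high", 5), ("critical", 10)]

def calculate_flag_weight_score (flags : List (List (String × String))) : Int :=
  flags.foldl (fun score f =>
    score + pvWeights.getD ((PySem.Dict.ofList f).getD "severity" "medium") 2) 0

def should_auto_hold_content (flags : List (List (String × String))) : Bool :=
  let serious_count : Int := (flags.map (fun f =>
    if (PySem.Dict.ofList f).get? "severity" = some "high" ∨
       (PySem.Dict.ofList f).get? "severity" = some "critical"
    then (1 : Int) else 0)).sum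
  if serious_count ≥ 3 then true
  else if calculate_flag_weight_score flags ≥ 15 then true
  else false

-- ===== PORT B =====
-- weight of one table key: 2 if sev is None else weights.get(sev, 2)
def pvSevWeight : Option String → Int
  | none => 2
  | some s => pvWeights.getD s 2

def should_auto_hold_content_alt (flags : List (List (String × String))) : Bool :=
  let table : PySem.Dict (Option String) Int :=
    flags.foldl (fun d f =>
      let sev := (PySem.Dict.ofList f).get? "severity"
      d.insert sev (d.getD sev 0 + 1)) PySem.Dict.empty
  let serious : Int := table.getD (some "high") 0 + table.getD (some "critical") 0
  let score : Int := (table.items.map (fun kv => kv.2 * pvSevWeight kv.1)).sum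
  decide (serious ≥ 3) || decide (score ≥ 15)

-- ===== PRECONDITION & SPEC =====
def Spec_should_auto_hold_content (flags : List (List (String × String))) (out : Bool) : Prop := out = should_auto_hold_content_alt flags
instance (flags : List (List (String × String))) (out : Bool) : Decidable (Spec_should_auto_hold_content flags out) := by unfold Spec_should_auto_hold_content; infer_instance

-- ===== CLAIM (what is proved, stated in full; the proofs are below) =====
def Claim_equal_should_auto_hold_content : Prop := ∀ (flags : List (List (String × String))), Dom_should_auto_hold_content flags → Spec_should_auto_hold_content flags (should_auto_hold_content flags)

-- ===== LEMMAS AND PROOFS =====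

-- the severity read both ports perform on one flag dict
def pvSev (f : List (String × String)) : Option String := (PySem.Dict.ofList f).get? "severity"

-- B's table is Counter(severities)
lemma pv_table_eq (flags : List (List (String × String))) :
    flags.foldl (fun d f =>
      let sev := (PySem.Dict.ofList f).get? "severity"
      d.insert sev (d.getD sev 0 + 1)) PySem.Dict.empty
    = PySem.Dict.counter (flags.map pvSev) := by
  rw [← PySem.Dict.foldl_insert_getD_add_one_eq_counter, List.foldl_map]
  rfl

-- counting two distinct values separately = one 0/1 scan for the disjunction
lemma pv_count_or (l : List (Option String)) :
    ((l.count (some "high") : Int) + (l.count (some "critical") : Int))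
    = (l.map (fun s => if s = some "high" ∨ s = some "critical" then (1 : Int) else 0)).sum := by
  induction l with
  | nil => simp
  | cons x t ih =>
    simp only [List.count_cons, List.map_cons, List.sum_cons]
    rcases Decidable.em (x = some "high") with h | h <;>
      rcases Decidable.em (x = some "critical") with h' | h' <;>
      simp [h, h'] <;> omega

-- summing one ite hit over a nodup key list containing x
lemma pv_sum_ite_hit (K : List (Option String)) (W : Option String → Int) (x : Option String)
    (hnd : K.Nodup) (hx : x ∈ K) :
    (K.map (fun k => if k = x then W k else 0)).sum = W x := by
  induction K with
  | nil => cases hx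
  | cons a t ih =>
    rcases List.nodup_cons.mp hnd with ⟨ha, hndt⟩
    by_cases h : a = x
    · subst h
      have hz : (t.map (fun k => if k = a then W k else 0)).sum = 0 := by
        apply List.sum_eq_zero
        intro y hy
        rcases List.mem_map.mp hy with ⟨k, hk, rfl⟩
        have hne : k ≠ a := fun e => ha (e ▸ hk)
        simp [hne]
      simp [hz]
    · have hx' : x ∈ t := by
        rcases List.mem_cons.mp hx with h' | h'
        · exact absurd h'.symm h
        · exact h'
      simp [h, ih hndt hx']

-- summing a projection over the whole list = summing count · projection over any nodup superset of keys
lemma pv_sum_counts_aux (K : List (Option String)) (l : List (Option String))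
    (W : Option String → Int) (hnd : K.Nodup) (hsub : ∀ x ∈ l, x ∈ K) :
    (K.map (fun k => (l.count k : Int) * W k)).sum = (l.map W).sum := by
  induction l with
  | nil => simp
  | cons x t ih =>
    have := ih (fun y hy => hsub y (List.mem_cons_of_mem x hy))
    calc (K.map (fun k => ((x :: t).count k : Int) * W k)).sum
        = (K.map (fun k => (t.count k : Int) * W k + if k = x then W k else 0)).sum := by
          apply congrArg
          apply List.map_congr_left
          intro k _
          by_cases h : k = x
          · simp [h]
            ring
          · have hxk : ¬x = k := fun e => h e.symm
            simp [h, hxk]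
      _ = (K.map (fun k => (t.count k : Int) * W k)).sum
            + (K.map (fun k => if k = x then W k else 0)).sum := by
          rw [← List.sum_map_add]
      _ = (t.map W).sum + W x := by
          rw [this, pv_sum_ite_hit K W x hnd (hsub x (List.mem_cons_self))]
      _ = ((x :: t).map W).sum := by simp [add_comm]

-- summing a projection over the whole list = summing count · projection over the distinct keys
lemma pv_sum_counts (l : List (Option String)) (W : Option String → Int) :
    ((PySem.Set.ofList l).map (fun k => (l.count k : Int) * W k)).sum = (l.map W).sum := by
  exact pv_sum_counts_aux _ l W (PySem.Set.nodup_ofList l)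
    (fun x hx => (PySem.Set.mem_ofList l x).mpr hx)

-- per-flag: A's defaulted weight lookup = B's table-key weight
lemma pv_weight_eq (f : List (String × String)) :
    pvWeights.getD ((PySem.Dict.ofList f).getD "severity" "medium") 2 = pvSevWeight (pvSev f) := by
  unfold pvSev
  cases h : (PySem.Dict.ofList f).get? "severity" with
  | none => simp [PySem.Dict.getD, h, pvSevWeight]; rfl
  | some s => simp [PySem.Dict.getD, h, pvSevWeight]

-- ===== VERDICT (by name: the statement is the Claim_ definition above) =====
theorem should_auto_hold_content_spec : Claim_equal_should_auto_hold_content := by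
  intro flags _
  unfold Spec_should_auto_hold_content should_auto_hold_content should_auto_hold_content_alt
  rw [pv_table_eq]
  set l := flags.map pvSev with hl
  -- serious counts agree
  have hser : (flags.map (fun f =>
      if (PySem.Dict.ofList f).get? "severity" = some "high" ∨
         (PySem.Dict.ofList f).get? "severity" = some "critical"
      then (1 : Int) else 0)).sum
      = (PySem.Dict.counter l).getD (some "high") 0 + (PySem.Dict.counter l).getD (some "critical") 0 := by
    rw [PySem.Dict.getD_counter, PySem.Dict.getD_counter, pv_count_or, hl, List.map_map]
    rfl
  -- scores agree
  have hsc : calculate_flag_weight_score flags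
      = ((PySem.Dict.counter l).items.map (fun kv => kv.2 * pvSevWeight kv.1)).sum := by
    unfold calculate_flag_weight_score
    rw [PySem.List.foldl_add (g := fun f =>
      pvWeights.getD ((PySem.Dict.ofList f).getD "severity" "medium") 2)]
    rw [PySem.Dict.items_counter, List.map_map]
    have : (flags.map fun f => pvWeights.getD ((PySem.Dict.ofList f).getD "severity" "medium") 2)
        = l.map pvSevWeight := by
      rw [hl, List.map_map]
      exact List.map_congr_left (fun f _ => pv_weight_eq f)
    rw [this, ← pv_sum_counts l pvSevWeight]
    simp only [Function.comp_def, zero_add]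
  simp only [hser, hsc]
  by_cases h1 : (PySem.Dict.counter l).getD (some "high") 0 + (PySem.Dict.counter l).getD (some "critical") 0 ≥ 3 <;>
    by_cases h2 : ((PySem.Dict.counter l).items.map (fun kv => kv.2 * pvSevWeight kv.1)).sum ≥ 15 <;>
    simp [h2]
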